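-- pv_equiv track=rewrite | github.com/feliP-P/Algo-3---TDA-1C-2024 | problema-3-v1.15.py | solution
-- ===== SOURCE A (Python) =====
-- def solution(tree,height,f,accorn):
--     mem1 = [[0]*tree for _ in range(height)]
--     for t in range(tree):
--         mem1[0][t] = accorn[t][0]
--
--     for h in range(1,height):
--         if h-f >= 0:
--             maxi = max(mem1[h-f])
--         else:
--             maxi = 0
--         for t in range(tree):
--             mem1[h][t] = max(mem1[h-1][t], maxi) + accorn[t][h]
--
--     return max(mem1[height-1])
-- ===== SOURCE B (Python) =====
-- def solution(tree, height, f, accorn):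
--     # Top-down memoized recursion on (h, t) over the same recurrence,
--     # instead of A's bottom-up table fill.
--     memo = {}
--
--     def val(h, t):
--         if (h, t) in memo:
--             return memo[(h, t)]
--         if h == 0:
--             r = accorn[t][0]
--         else:
--             if h - f >= 0:
--                 maxi = max(val(h - f, tt) for tt in range(tree))
--             else:
--                 maxi = 0
--             r = max(val(h - 1, t), maxi) + accorn[t][h]
--         memo[(h, t)] = r
--         return r
--
--     return max(val(height - 1, t) for t in range(tree))
-- ===== Notes on version B (the rewrite author's own statement) =====
-- stated objective: alternative
-- what changed: Replaces A's bottom-up iterative fill of a height-by-tree table with a top-down memoized recursion val(h,t) over the same recurrence (demand-driven evaluation with a dict cache instead of staged loops over a preallocated table).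
-- outside the precondition, e.g. on solution(2, 2, 0, [[1, 2], [3, 4]]): A returns 7, B raises RecursionError
import Mathlib
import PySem

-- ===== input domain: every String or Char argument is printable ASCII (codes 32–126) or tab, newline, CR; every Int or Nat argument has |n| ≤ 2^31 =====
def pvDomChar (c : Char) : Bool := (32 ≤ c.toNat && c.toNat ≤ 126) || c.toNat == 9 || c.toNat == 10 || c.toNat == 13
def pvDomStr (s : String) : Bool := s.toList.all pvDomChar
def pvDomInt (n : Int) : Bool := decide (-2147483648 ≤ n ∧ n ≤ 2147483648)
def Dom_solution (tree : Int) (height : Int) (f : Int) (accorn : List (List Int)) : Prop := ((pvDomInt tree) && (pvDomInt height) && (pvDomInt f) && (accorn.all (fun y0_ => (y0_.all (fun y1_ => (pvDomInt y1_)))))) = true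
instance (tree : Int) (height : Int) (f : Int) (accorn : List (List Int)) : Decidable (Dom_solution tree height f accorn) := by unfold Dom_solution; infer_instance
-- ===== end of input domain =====

-- B replaces A's bottom-up iterative fill of a height×tree table with a top-down
-- memoized recursion val(h,t) over the same recurrence (alternative decomposition).

-- max(xs) for a nonempty Int list (used identically by both ports)
def pyMax (xs : List Int) : Int := (PySem.List.max? xs (fun y => y)).getD 0

-- ===== PORT A =====
-- mem1[i][j] = v  (functional update of the nested list)
def setRC (m : List (List Int)) (i j : Int) (v : Int) : List (List Int) :=
  PySem.List.pySetD m i (PySem.List.pySetD (PySem.List.pyGetD m i []) j v)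

-- 'for t in range(tree): mem1[0][t] = accorn[t][0]'
def initA (tree : Int) (accorn : List (List Int)) (m : List (List Int)) : List (List Int) :=
  (PySem.List.pyRange 0 tree 1).foldl
    (fun m t => setRC m 0 t (PySem.List.pyGetD (PySem.List.pyGetD accorn t []) 0 0)) m

-- the body of 'for h in range(1, height)'
def stepA (tree : Int) (f : Int) (accorn : List (List Int)) (m : List (List Int)) (h : Int) : List (List Int) :=
  let maxi : Int := if h - f ≥ 0 then pyMax (PySem.List.pyGetD m (h - f) []) else 0
  (PySem.List.pyRange 0 tree 1).foldl
    (fun m' t =>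
      setRC m' h t
        (max (PySem.List.pyGetD (PySem.List.pyGetD m' (h - 1) []) t 0) maxi
         + PySem.List.pyGetD (PySem.List.pyGetD accorn t []) h 0)) m

def solution (tree : Int) (height : Int) (f : Int) (accorn : List (List Int)) : Int :=
  let mem0 : List (List Int) :=
    (PySem.List.pyRange 0 height 1).map (fun _ => PySem.List.pyRepeat [(0 : Int)] tree)
  let mem1 := initA tree accorn mem0
  let mem2 := (PySem.List.pyRange 1 height 1).foldl (fun m h => stepA tree f accorn m h) mem1
  pyMax (PySem.List.pyGetD mem2 (height - 1) [])

-- ===== PORT B =====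
-- 'max(val(h - f, tt) for tt in range(tree))': the generator's running max,
-- threading the memo dict through the recursive calls (None = no element yet)
mutual
def maxLoopB (tree : Int) (f : Int) (accorn : List (List Int)) (hf : Nat)
    (ts : List Int) (memo : PySem.Dict (Int × Int) Int) (best : Option Int) :
    PySem.Dict (Int × Int) Int × Option Int :=
  match ts with
  | [] => (memo, best)
  | tt :: rest =>
    let p := valB tree f accorn hf tt memo
    maxLoopB tree f accorn hf rest p.1
      (some (match best with | none => p.2 | some b => max b p.2))
termination_by hf * (tree.toNat + 2) + (tree.toNat + 2) + ts.length
decreasing_by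
  · simp only [List.length_cons]; omega
  · simp only [List.length_cons]; omega

-- the inner function 'val(h, t)' of Source B (memo is threaded state)
def valB (tree : Int) (f : Int) (accorn : List (List Int)) (hn : Nat) (t : Int)
    (memo : PySem.Dict (Int × Int) Int) : PySem.Dict (Int × Int) Int × Int :=
  match memo.get? ((hn : Int), t) with
  | some v => (memo, v)
  | none =>
    if hn = 0 then
      let r := PySem.List.pyGetD (PySem.List.pyGetD accorn t []) 0 0
      (memo.insert ((hn : Int), t) r, r)
    else
      let s :=
        if 0 ≤ (hn : Int) - f then
          if _hlt : ((hn : Int) - f).toNat < hn then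
            maxLoopB tree f accorn (((hn : Int) - f).toNat) (PySem.List.pyRange 0 tree 1) memo none
          else (memo, none)   -- totality guard only: for f ≤ 0 the Python recursion never terminates
        else (memo, none)
      let maxi : Int := if 0 ≤ (hn : Int) - f then (s.2).getD 0 else 0
      let q := valB tree f accorn (hn - 1) t s.1
      let r := max q.2 maxi + PySem.List.pyGetD (PySem.List.pyGetD accorn t []) ((hn : Int)) 0
      (q.1.insert ((hn : Int), t) r, r)
termination_by hn * (tree.toNat + 2) + tree.toNat + 1
decreasing_by
  · have hlen : (PySem.List.pyRange 0 tree 1).length = tree.toNat := by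
      rw [PySem.List.length_pyRange_one]; congr 1; omega
    rw [hlen]
    have h2 : (((hn : Int) - f).toNat + 1) * (tree.toNat + 2) ≤ hn * (tree.toNat + 2) :=
      Nat.mul_le_mul_right _ (by omega)
    rw [Nat.succ_mul] at h2
    omega
  · have h2 : (hn - 1 + 1) * (tree.toNat + 2) ≤ hn * (tree.toNat + 2) :=
      Nat.mul_le_mul_right _ (by omega)
    rw [Nat.succ_mul] at h2
    omega
end

-- 'max(val(height - 1, t) for t in range(tree))'
def solution_alt (tree : Int) (height : Int) (f : Int) (accorn : List (List Int)) : Int :=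
  let r :=
    (PySem.List.pyRange 0 tree 1).foldl
      (fun (s : PySem.Dict (Int × Int) Int × Option Int) t =>
        let p := valB tree f accorn (height - 1).toNat t s.1
        (p.1, some (match s.2 with | none => p.2 | some b => max b p.2)))
      (PySem.Dict.empty, none)
  (r.2).getD 0

-- ===== PRECONDITION & SPEC =====
-- Pre_ excludes nonpositive tree/height and shape-mismatched accorn (A raises ValueError
-- or IndexError there), and f ≤ 0 with height ≥ 2: for f < 0 A raises IndexError, and for
-- f = 0 A returns a value (its maxi reads its own still-zero row) while B's recursion
-- val(h,·) → val(h-f,·) never descends and raises RecursionError.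
def Pre_solution (tree : Int) (height : Int) (f : Int) (accorn : List (List Int)) : Prop :=
  1 ≤ tree ∧ 1 ≤ height ∧ (1 ≤ f ∨ height = 1) ∧ tree ≤ (accorn.length : Int) ∧
  ∀ row ∈ accorn.take tree.toNat, height ≤ (row.length : Int)
instance (tree : Int) (height : Int) (f : Int) (accorn : List (List Int)) : Decidable (Pre_solution tree height f accorn) := by unfold Pre_solution; infer_instance

def pvWitness_solution : Int × Int × Int × List (List Int) := (2, 2, 1, [[1, 2], [3, 4]])

def Spec_solution (tree : Int) (height : Int) (f : Int) (accorn : List (List Int)) (out : Int) : Prop := out = solution_alt tree height f accorn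
instance (tree : Int) (height : Int) (f : Int) (accorn : List (List Int)) (out : Int) : Decidable (Spec_solution tree height f accorn out) := by unfold Spec_solution; infer_instance

-- ===== CLAIM (what is proved, stated in full; the proofs are below) =====
def Claim_equal_solution : Prop := ∀ (tree : Int) (height : Int) (f : Int) (accorn : List (List Int)), Dom_solution tree height f accorn → Pre_solution tree height f accorn → Spec_solution tree height f accorn (solution tree height f accorn)

-- ===== LEMMAS AND PROOFS =====

-- accorn[t][h] with defaults (both ports read it the same way)
def aat (accorn : List (List Int)) (t h : Nat) : Int := (accorn.getD t []).getD h 0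

-- the mathematical DP row h, given the list `done` of rows 0..h-1
def newRow (f : Int) (accorn : List (List Int)) (n : Nat) (done : List (List Int)) (h : Nat) : List Int :=
  if h = 0 then (List.range n).map (fun t => aat accorn t 0)
  else
    (List.range n).map (fun t =>
      max ((done.getD (h - 1) []).getD t 0)
          (if (h : Int) - f ≥ 0 then pyMax (done.getD ((h : Int) - f).toNat []) else 0)
      + aat accorn t h)

-- rows 0..H-1 of the DP table
def rows (f : Int) (accorn : List (List Int)) (n : Nat) : Nat → List (List Int)
  | 0 => []
  | H + 1 => rows f accorn n H ++ [newRow f accorn n (rows f accorn n H) H]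

lemma length_rows (f : Int) (accorn : List (List Int)) (n H : Nat) :
    (rows f accorn n H).length = H := by
  induction H with
  | zero => rfl
  | succ H ih => simp [rows, ih]

lemma rows_getD (f : Int) (accorn : List (List Int)) (n : Nat) {i H : Nat} (hiH : i < H) :
    (rows f accorn n H).getD i [] = newRow f accorn n (rows f accorn n i) i := by
  induction H with
  | zero => omega
  | succ H ih =>
    by_cases hi : i < H
    · rw [rows, List.getD_append _ _ _ _ (by rw [length_rows]; omega)]
      exact ih hi
    · have : i = H := by omega
      subst this
      rw [rows, List.getD_append_right _ _ _ _ (by rw [length_rows])]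
      simp [length_rows]

-- writing positions 0..m-1 of a row, one set at a time
lemma foldl_set_prefix (v : Nat → Int) :
    ∀ (m : Nat) (r : List Int), m ≤ r.length →
      (List.range m).foldl (fun r t => r.set t (v t)) r = (List.range m).map v ++ r.drop m := by
  intro m
  induction m with
  | zero => simp
  | succ m ih =>
    intro r hm
    rw [List.range_succ, List.foldl_append, ih r (by omega)]
    simp only [List.foldl_cons, List.foldl_nil]
    simp only [List.set_append, List.length_map, List.length_range, Nat.sub_self, List.map_append, List.append_assoc,
      List.map_cons, List.map_nil]
    rw [List.drop_eq_getElem_cons (by omega : m < r.length), List.set_cons_zero,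
      if_neg (by omega)]
    simp

-- A state of the shape done ++ r :: rest, where only row `done.length` is written:
-- the nested fold reduces to a fold on the row alone
lemma fold_row_sim (done rest : List (List Int)) (n : Nat)
    (val : List (List Int) → Nat → Int) (g : Nat → Int)
    (hval : ∀ r, r.length = n → ∀ t, val (done ++ r :: rest) t = g t) :
    ∀ (L : List Nat) (r : List Int), r.length = n →
      L.foldl (fun m' t => m'.set done.length ((m'.getD done.length []).set t (val m' t)))
        (done ++ r :: rest)
      = done ++ (L.foldl (fun r t => r.set t (g t)) r) :: rest := by
  intro L
  induction L with
  | nil => intro r hr; simp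
  | cons t L ih =>
    intro r hr
    simp only [List.foldl_cons]
    have h1 : (done ++ r :: rest).getD done.length [] = r := by
      rw [List.getD_append_right _ _ _ _ le_rfl]; simp
    have h2 : (done ++ r :: rest).set done.length (r.set t (val (done ++ r :: rest) t))
        = done ++ (r.set t (val (done ++ r :: rest) t)) :: rest := by
      rw [List.set_append, if_neg (by simp)]; simp
    rw [h1, h2, hval r hr t]
    exact ih _ (by simp [hr])

-- one outer-loop step of A, on a state whose rows 0..done.length-1 are `done`
lemma stepA_eq (f : Int) (accorn : List (List Int)) (n : Nat) (done rest : List (List Int))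
    (r : List Int) (hr : r.length = n) (hd : 1 ≤ done.length) (hf : 1 ≤ f) :
    stepA (n : Int) f accorn (done ++ r :: rest) (done.length : Int)
      = done ++ newRow f accorn n done done.length :: rest := by
  have hmaxi : (if (done.length : Int) - f ≥ 0
        then pyMax (PySem.List.pyGetD (done ++ r :: rest) ((done.length : Int) - f) []) else 0)
      = (if (done.length : Int) - f ≥ 0
        then pyMax (done.getD ((done.length : Int) - f).toNat []) else 0) := by
    split
    · next hge =>
      have hlt : ((done.length : Int) - f).toNat < done.length := by omega
      rw [PySem.List.pyGetD_eq_getElem _ _ hge (by simp; omega),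
        List.getElem_append_left hlt, List.getD_eq_getElem _ _ hlt]
    · rfl
  have hbody : ∀ (m' : List (List Int)) (t : Nat), t ∈ List.range n →
      setRC m' ((done.length : Nat) : Int) ((t : Nat) : Int)
        (max (PySem.List.pyGetD (PySem.List.pyGetD m' (((done.length : Nat) : Int) - 1) []) ((t : Nat) : Int) 0)
             (if (done.length : Int) - f ≥ 0 then pyMax (done.getD ((done.length : Int) - f).toNat []) else 0)
         + PySem.List.pyGetD (PySem.List.pyGetD accorn ((t : Nat) : Int) []) ((done.length : Nat) : Int) 0)
      = m'.set done.length ((m'.getD done.length []).set t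
          (max ((m'.getD (done.length - 1) []).getD t 0)
               (if (done.length : Int) - f ≥ 0 then pyMax (done.getD ((done.length : Int) - f).toNat []) else 0)
           + aat accorn t done.length)) := by
    intro m' t _
    have hcast : ((done.length : Int) - 1) = ((done.length - 1 : Nat) : Int) := by omega
    simp [setRC, aat, hcast, PySem.List.pyGetD_natCast, PySem.List.pySetD_natCast]
  have hval : ∀ (r' : List Int), r'.length = n → ∀ (t : Nat),
      (fun (m' : List (List Int)) (t : Nat) =>
        max ((m'.getD (done.length - 1) []).getD t 0)
            (if (done.length : Int) - f ≥ 0 then pyMax (done.getD ((done.length : Int) - f).toNat []) else 0)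
         + aat accorn t done.length) (done ++ r' :: rest) t
      = max ((done.getD (done.length - 1) []).getD t 0)
            (if (done.length : Int) - f ≥ 0 then pyMax (done.getD ((done.length : Int) - f).toNat []) else 0)
         + aat accorn t done.length := by
    intro r' _ t
    simp only []
    rw [List.getD_append _ _ _ _ (by omega)]
  simp only [stepA]
  rw [hmaxi, PySem.List.pyRange_zero_nat, List.foldl_map]
  rw [PySem.List.foldl_congr_mem _ _ _ _ hbody]
  rw [fold_row_sim done rest n _ _ hval (List.range n) r hr]
  rw [foldl_set_prefix _ n r (le_of_eq hr.symm)]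
  rw [newRow, if_neg (by omega : ¬ done.length = 0)]
  simp [hr]

-- A's first loop fills row 0
lemma initA_eq (f : Int) (accorn : List (List Int)) (n : Nat) (rest : List (List Int))
    (r : List Int) (hr : r.length = n) :
    initA (n : Int) accorn (r :: rest) = newRow f accorn n [] 0 :: rest := by
  have hbody : ∀ (m' : List (List Int)) (t : Nat), t ∈ List.range n →
      setRC m' 0 ((t : Nat) : Int)
        (PySem.List.pyGetD (PySem.List.pyGetD accorn ((t : Nat) : Int) []) 0 0)
      = m'.set ([] : List (List Int)).length
          ((m'.getD ([] : List (List Int)).length []).set t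
            ((fun (_ : List (List Int)) (t : Nat) => aat accorn t 0) m' t)) := by
    intro m' t _
    simp [setRC, aat, PySem.List.pyGetD_natCast,
      PySem.List.pySetD_of_nonneg, PySem.List.pyGetD_zero]
  have hval : ∀ (r' : List Int), r'.length = n → ∀ (t : Nat),
      (fun (_ : List (List Int)) (t : Nat) => aat accorn t 0) (([] : List (List Int)) ++ r' :: rest) t
      = aat accorn t 0 := by
    intro r' _ t; rfl
  simp only [initA]
  rw [PySem.List.pyRange_zero_nat, List.foldl_map]
  rw [PySem.List.foldl_congr_mem _ _ _ _ hbody]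
  have := fold_row_sim ([] : List (List Int)) rest n (fun _ t => aat accorn t 0) (fun t => aat accorn t 0) hval (List.range n) r hr
  simp only [List.nil_append] at this
  rw [this, foldl_set_prefix _ n r (le_of_eq hr.symm)]
  rw [newRow, if_pos rfl]
  simp [hr]

-- A's outer loop, as an invariant over the number of processed heights
lemma stateA (f : Int) (accorn : List (List Int)) (n ht : Nat) :
    ∀ K, K + 1 ≤ ht → (K = 0 ∨ 1 ≤ f) →
      (PySem.List.pyRange 1 ((K + 1 : Nat) : Int) 1).foldl
        (fun m h => stepA (n : Int) f accorn m h)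
        (rows f accorn n 1 ++ List.replicate (ht - 1) (List.replicate n 0))
      = rows f accorn n (K + 1) ++ List.replicate (ht - (K + 1)) (List.replicate n 0) := by
  intro K
  induction K with
  | zero => intro _ _; rw [PySem.List.pyRange_one_eq_nil (by norm_num)]; rfl
  | succ K ih =>
    intro hK hf
    have hf1 : 1 ≤ f := hf.resolve_left (Nat.succ_ne_zero K)
    rw [show ((K + 2 : Nat) : Int) = ((K + 1 : Nat) : Int) + 1 from by push_cast; ring,
      PySem.List.pyRange_one_succ_right (by push_cast; omega), List.foldl_append,
      ih (by omega) (Or.inr hf1)]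
    simp only [List.foldl_cons, List.foldl_nil]
    rw [show List.replicate (ht - (K + 1)) (List.replicate n (0 : Int))
          = List.replicate n (0 : Int) :: List.replicate (ht - (K + 2)) (List.replicate n 0) from by
        rw [← List.replicate_succ]; congr 1; omega]
    have hlen : (rows f accorn n (K + 1)).length = K + 1 := length_rows ..
    have hstep := stepA_eq f accorn n (rows f accorn n (K + 1))
      (List.replicate (ht - (K + 2)) (List.replicate n 0)) (List.replicate n 0)
      (by simp) (by rw [hlen]; omega) hf1
    rw [hlen] at hstep
    rw [hstep]
    simp [rows]

-- A's initial table is row 0 followed by zero rows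
lemma mem0_eq (n ht : Nat) :
    (PySem.List.pyRange 0 ((ht : Nat) : Int) 1).map (fun _ => PySem.List.pyRepeat [(0 : Int)] ((n : Nat) : Int))
    = List.replicate ht (List.replicate n 0) := by
  rw [PySem.List.pyRepeat_singleton]
  apply List.eq_replicate_iff.mpr
  constructor
  · simp [PySem.List.length_pyRange_one]
  · intro b hb
    rcases List.mem_map.mp hb with ⟨x, _, hx⟩
    simp [← hx]

-- A evaluates to the max of the last DP row
lemma A_eval (f : Int) (accorn : List (List Int)) (n ht : Nat)
    (hht : 1 ≤ ht) (hf : ht - 1 = 0 ∨ 1 ≤ f) :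
    solution (n : Int) (ht : Int) f accorn
      = pyMax (newRow f accorn n (rows f accorn n (ht - 1)) (ht - 1)) := by
  unfold solution
  simp only []
  rw [mem0_eq n ht,
    show List.replicate ht (List.replicate n (0 : Int))
        = List.replicate n (0 : Int) :: List.replicate (ht - 1) (List.replicate n 0) from by
      rw [← List.replicate_succ]; congr 1; omega,
    initA_eq f accorn n _ _ (by simp),
    show newRow f accorn n [] 0 :: List.replicate (ht - 1) (List.replicate n (0 : Int))
        = rows f accorn n 1 ++ List.replicate (ht - 1) (List.replicate n 0) from by simp [rows],
    show ((ht : Nat) : Int) = (((ht - 1) + 1 : Nat) : Int) from by omega,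
    stateA f accorn n ht (ht - 1) (by omega) hf]
  rw [show ((((ht - 1) + 1 : Nat) : Int) - 1) = ((ht - 1 : Nat) : Int) from by push_cast; ring,
    PySem.List.pyGetD_natCast,
    List.getD_append _ _ _ _ (by rw [length_rows]; omega),
    rows_getD f accorn n (by omega : ht - 1 < ht - 1 + 1)]

-- ---- B side ----

-- the value of DP cell (h, t) (as B addresses it, by an Int tree index)
def cellB (f : Int) (accorn : List (List Int)) (n : Nat) (h : Nat) (t : Int) : Int :=
  (newRow f accorn n (rows f accorn n h) h).getD t.toNat 0

-- every entry of the memo is a correct DP cell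
def goodB (f : Int) (accorn : List (List Int)) (n : Nat)
    (memo : PySem.Dict (Int × Int) Int) : Prop :=
  ∀ p v, memo.get? p = some v → v = cellB f accorn n p.1.toNat p.2

lemma goodB_empty (f : Int) (accorn : List (List Int)) (n : Nat) :
    goodB f accorn n PySem.Dict.empty := by
  intro p v h
  rw [PySem.Dict.get?_empty] at h
  exact absurd h (by simp)

lemma goodB_insert (f : Int) (accorn : List (List Int)) (n : Nat)
    (memo : PySem.Dict (Int × Int) Int) (hg : goodB f accorn n memo)
    (h : Nat) (t : Int) (v : Int) (hv : v = cellB f accorn n h t) :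
    goodB f accorn n (memo.insert ((h : Int), t) v) := by
  intro p w hw
  rw [PySem.Dict.get?_insert] at hw
  split at hw
  · next heq =>
    subst heq
    simp only [Option.some.injEq] at hw
    subst hw
    simpa using hv
  · exact hg p w hw

-- accorn[t][h], as both sides read it
lemma aat_pyGetD (accorn : List (List Int)) (tn h : Nat) :
    PySem.List.pyGetD (PySem.List.pyGetD accorn ((tn : Nat) : Int) []) ((h : Nat) : Int) 0
      = aat accorn tn h := by
  simp [aat, PySem.List.pyGetD_natCast]

lemma aat0_pyGetD (accorn : List (List Int)) (tn : Nat) :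
    PySem.List.pyGetD (PySem.List.pyGetD accorn ((tn : Nat) : Int) []) 0 0
      = aat accorn tn 0 := by
  simp [aat, PySem.List.pyGetD_natCast, PySem.List.pyGetD_zero]

-- the DP cell at height 0
lemma cellB_zero (f : Int) (accorn : List (List Int)) (n tn : Nat) (htn : tn < n) :
    cellB f accorn n 0 ((tn : Nat) : Int) = aat accorn tn 0 := by
  rw [cellB, newRow, if_pos rfl, Int.toNat_natCast,
    List.getD_eq_getElem _ _ (by simpa using htn)]
  simp

-- the DP cell at a positive height (f ≥ 1)
lemma cellB_succ (f : Int) (accorn : List (List Int)) (n hn tn : Nat)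
    (h0 : hn ≠ 0) (hf : 1 ≤ f) (htn : tn < n) :
    cellB f accorn n hn ((tn : Nat) : Int)
      = max (cellB f accorn n (hn - 1) ((tn : Nat) : Int))
          (if 0 ≤ (hn : Int) - f then
            pyMax (newRow f accorn n (rows f accorn n ((hn : Int) - f).toNat) ((hn : Int) - f).toNat)
          else 0)
        + aat accorn tn hn := by
  conv_lhs => rw [cellB, newRow, if_neg h0]
  rw [Int.toNat_natCast, List.getD_eq_getElem _ _ (by simpa using htn)]
  simp only [List.getElem_map, List.getElem_range]
  congr 2
  · rw [rows_getD f accorn n (by omega : hn - 1 < hn), cellB, Int.toNat_natCast]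
  · split
    · next hge =>
      rw [rows_getD f accorn n (by omega : ((hn : Int) - f).toNat < hn)]
    · rfl

-- maxLoopB with a good memo returns the running max of the cells
lemma maxLoopB_spec (f : Int) (accorn : List (List Int)) (n : Nat) (hf : Nat)
    (Hval : ∀ t memo, goodB f accorn n memo → 0 ≤ t → t < (n : Int) →
      (valB (n : Int) f accorn hf t memo).2 = cellB f accorn n hf t ∧
      goodB f accorn n (valB (n : Int) f accorn hf t memo).1) :
    ∀ ts : List Int, (∀ tt ∈ ts, 0 ≤ tt ∧ tt < (n : Int)) →
      ∀ memo best, goodB f accorn n memo →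
      goodB f accorn n (maxLoopB (n : Int) f accorn hf ts memo best).1 ∧
      (maxLoopB (n : Int) f accorn hf ts memo best).2
        = ts.foldl (fun b tt => some (match b with
            | none => cellB f accorn n hf tt
            | some x => max x (cellB f accorn n hf tt))) best := by
  intro ts
  induction ts with
  | nil =>
    intro _ memo best hg
    rw [maxLoopB.eq_def]
    exact ⟨hg, rfl⟩
  | cons tt rest ih =>
    intro hmem memo best hg
    obtain ⟨h0, h1⟩ := hmem tt (by simp)
    obtain ⟨hv, hg'⟩ := Hval tt memo hg h0 h1
    rw [maxLoopB.eq_def]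
    simp only [hv]
    exact ih (fun x hx => hmem x (by simp [hx])) _ _ hg'

-- the option-max fold over a list of values is max? of that list
lemma fold_optmax (g : Int → Int) :
    ∀ (l : List Int) (b : Int),
      l.foldl (fun b tt => some (match b with
          | none => g tt
          | some x => max x (g tt))) (some b)
      = some ((l.map g).foldl max b) := by
  intro l
  induction l with
  | nil => intro b; rfl
  | cons x rest ih => intro b; simp [ih]

lemma fold_optmax_none (g : Int → Int) (x : Int) (l : List Int) :
    (x :: l).foldl (fun b tt => some (match b with
        | none => g tt
        | some x => max x (g tt))) none
      = some ((l.map g).foldl max (g x)) := by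
  rw [List.foldl_cons]
  exact fold_optmax g l (g x)

-- the row is the list of its cells
lemma row_eq_map_cells (f : Int) (accorn : List (List Int)) (n h : Nat) :
    newRow f accorn n (rows f accorn n h) h
      = (List.range n).map (fun k => cellB f accorn n h ((k : Nat) : Int)) := by
  have hlen : (newRow f accorn n (rows f accorn n h) h).length = n := by
    unfold newRow; split <;> simp
  apply List.ext_getElem
  · simp [hlen]
  · intro i hi hi'
    simp only [List.getElem_map, List.getElem_range]
    rw [cellB, Int.toNat_natCast, List.getD_eq_getElem _ _ (by rw [hlen]; simpa using hi')]

-- the running max over range(tree) is the max of the DP row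
lemma optmax_pyMax (f : Int) (accorn : List (List Int)) (n h : Nat) (hn1 : 1 ≤ n) :
    (PySem.List.pyRange 0 (n : Int) 1).foldl (fun b tt => some (match b with
        | none => cellB f accorn n h tt
        | some x => max x (cellB f accorn n h tt))) none
      = some (pyMax (newRow f accorn n (rows f accorn n h) h)) := by
  obtain ⟨m, rfl⟩ : ∃ m, n = m + 1 := ⟨n - 1, by omega⟩
  rw [PySem.List.pyRange_zero_nat, List.range_succ_eq_map, List.map_cons,
    fold_optmax_none, row_eq_map_cells, List.range_succ_eq_map, List.map_cons,
    pyMax, PySem.List.max?_id_cons]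
  simp [List.map_map, Function.comp_def]

-- the main simulation lemma: valB computes cellB and keeps the memo good
lemma valB_spec (f : Int) (accorn : List (List Int)) (n : Nat) :
    ∀ hn : Nat, ∀ t : Int, ∀ memo, goodB f accorn n memo →
      0 ≤ t → t < (n : Int) → (1 ≤ f ∨ hn = 0) →
      (valB (n : Int) f accorn hn t memo).2 = cellB f accorn n hn t ∧
      goodB f accorn n (valB (n : Int) f accorn hn t memo).1 := by
  intro hn
  induction hn using Nat.strong_induction_on with
  | _ hn IH =>
  intro t memo hg ht0 htn hfh
  obtain ⟨tn, rfl⟩ : ∃ tn : Nat, t = ((tn : Nat) : Int) := ⟨t.toNat, by omega⟩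
  have htn' : tn < n := by exact_mod_cast htn
  have hn1 : 1 ≤ n := by omega
  rw [valB.eq_def]
  cases hmem : memo.get? ((hn : Int), ((tn : Nat) : Int)) with
  | some v =>
    refine ⟨?_, hg⟩
    have := hg _ v hmem
    simpa using this
  | none =>
    by_cases h0 : hn = 0
    · subst h0
      have hr : PySem.List.pyGetD (PySem.List.pyGetD accorn ((tn : Nat) : Int) []) 0 0
          = cellB f accorn n 0 ((tn : Nat) : Int) := by
        rw [aat0_pyGetD accorn tn, cellB_zero f accorn n tn htn']
      exact ⟨hr, goodB_insert f accorn n memo hg 0 _ _ hr⟩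
    · have hf1 : 1 ≤ f := hfh.resolve_right h0
      rw [if_neg h0]
      -- the maxi stage
      have hmax : ∀ s : PySem.Dict (Int × Int) Int × Option Int,
          s = (if 0 ≤ (hn : Int) - f then
                if _hlt : ((hn : Int) - f).toNat < hn then
                  maxLoopB (n : Int) f accorn (((hn : Int) - f).toNat)
                    (PySem.List.pyRange 0 (n : Int) 1) memo none
                else (memo, none)
              else (memo, none)) →
          goodB f accorn n s.1 ∧
          (if 0 ≤ (hn : Int) - f then (s.2).getD 0 else 0)
            = (if 0 ≤ (hn : Int) - f then
                pyMax (newRow f accorn n (rows f accorn n ((hn : Int) - f).toNat) ((hn : Int) - f).toNat)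
              else 0) := by
        intro s hs
        by_cases hge : 0 ≤ (hn : Int) - f
        · have hlt : ((hn : Int) - f).toNat < hn := by omega
          rw [if_pos hge, dif_pos hlt] at hs
          have Hval := fun t' memo' hg' h0' h1' =>
            IH (((hn : Int) - f).toNat) hlt t' memo' hg' h0' h1' (Or.inl hf1)
          obtain ⟨hgood, hval⟩ := maxLoopB_spec f accorn n (((hn : Int) - f).toNat) Hval
            (PySem.List.pyRange 0 (n : Int) 1)
            (fun tt htt => by
              have := (PySem.List.mem_pyRange_one).mp htt
              exact ⟨this.1, this.2⟩)
            memo none hg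
          subst hs
          refine ⟨hgood, ?_⟩
          rw [if_pos hge, if_pos hge, hval, optmax_pyMax f accorn n _ hn1]
          rfl
        · rw [if_neg hge] at hs
          subst hs
          exact ⟨hg, by rw [if_neg hge, if_neg hge]⟩
      simp only []
      obtain ⟨hgood1, hmaxi⟩ := hmax _ rfl
      obtain ⟨hq, hgood2⟩ := IH (hn - 1) (by omega) ((tn : Nat) : Int) _ hgood1 ht0 htn (Or.inl hf1)
      rw [hq, hmaxi, aat_pyGetD accorn tn hn]
      refine ⟨(cellB_succ f accorn n hn tn h0 hf1 htn').symm, ?_⟩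
      exact goodB_insert f accorn n _ hgood2 hn _ _ (cellB_succ f accorn n hn tn h0 hf1 htn').symm

-- the top-level fold of Source B's 'max(val(height-1, t) for t in range(tree))'
lemma topfold_spec (f : Int) (accorn : List (List Int)) (n : Nat) (hh : Nat)
    (Hval : ∀ t memo, goodB f accorn n memo → 0 ≤ t → t < (n : Int) →
      (valB (n : Int) f accorn hh t memo).2 = cellB f accorn n hh t ∧
      goodB f accorn n (valB (n : Int) f accorn hh t memo).1) :
    ∀ ts : List Int, (∀ tt ∈ ts, 0 ≤ tt ∧ tt < (n : Int)) →
      ∀ memo best, goodB f accorn n memo →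
      (ts.foldl (fun (s : PySem.Dict (Int × Int) Int × Option Int) t =>
          let p := valB (n : Int) f accorn hh t s.1
          (p.1, some (match s.2 with | none => p.2 | some b => max b p.2))) (memo, best)).2
        = ts.foldl (fun b tt => some (match b with
            | none => cellB f accorn n hh tt
            | some x => max x (cellB f accorn n hh tt))) best := by
  intro ts
  induction ts with
  | nil => intro _ memo best hg; rfl
  | cons tt rest ih =>
    intro hmem memo best hg
    obtain ⟨h0, h1⟩ := hmem tt (by simp)
    obtain ⟨hv, hg'⟩ := Hval tt memo hg h0 h1
    simp only [List.foldl_cons, hv]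
    exact ih (fun x hx => hmem x (by simp [hx])) _ _ hg'

-- B evaluates to the max of the last DP row
lemma B_eval (f : Int) (accorn : List (List Int)) (n ht : Nat)
    (hn1 : 1 ≤ n) (hht : 1 ≤ ht) (hf : 1 ≤ f ∨ ht = 1) :
    solution_alt (n : Int) (ht : Int) f accorn
      = pyMax (newRow f accorn n (rows f accorn n (ht - 1)) (ht - 1)) := by
  have hfB : 1 ≤ f ∨ ht - 1 = 0 := by
    rcases hf with h | h
    · exact Or.inl h
    · exact Or.inr (by omega)
  unfold solution_alt
  simp only [show ((ht : Nat) : Int) - 1 = ((ht - 1 : Nat) : Int) from by omega,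
    Int.toNat_natCast]
  rw [topfold_spec f accorn n (ht - 1)
      (fun t memo hg h0 h1 => valB_spec f accorn n (ht - 1) t memo hg h0 h1 hfB)
      (PySem.List.pyRange 0 (n : Int) 1)
      (fun tt htt => by
        have := (PySem.List.mem_pyRange_one).mp htt
        exact ⟨this.1, this.2⟩)
      PySem.Dict.empty none (goodB_empty f accorn n),
    optmax_pyMax f accorn n (ht - 1) hn1]
  rfl

theorem solution_spec : Claim_equal_solution := by
  intro tree height f accorn _ hpre
  obtain ⟨ht1, hh1, hf, hacc, _⟩ := hpre
  obtain ⟨n, rfl⟩ : ∃ n : Nat, tree = (n : Int) := ⟨tree.toNat, by omega⟩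
  obtain ⟨ht, rfl⟩ : ∃ m : Nat, height = (m : Int) := ⟨height.toNat, by omega⟩
  have hn1 : 1 ≤ n := by exact_mod_cast ht1
  have hht1 : 1 ≤ ht := by exact_mod_cast hh1
  have hfA : ht - 1 = 0 ∨ 1 ≤ f := by
    rcases hf with h | h
    · exact Or.inr h
    · exact Or.inl (by omega)
  have hfB : 1 ≤ f ∨ ht = 1 := by
    rcases hf with h | h
    · exact Or.inl h
    · exact Or.inr (by omega)
  unfold Spec_solution
  rw [A_eval f accorn n ht hht1 hfA, B_eval f accorn n ht hn1 hht1 hfB]
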